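-- pv_equiv track=rewrite | github.com/MateiStoica-code/NSI-Spe | Exercice 1: Carré Magique.py | verification_somme
-- ===== SOURCE A (Python) =====
-- def somme_ligne(carre,n):
--     somme=0
--     for i in carre[n]:
--         somme+=i
--     return somme
--
-- def verification_somme(carre):
--     a=[]
--     for b in range(len(carre)):
--         a.append(somme_ligne(carre,b))
--
--     for y in range(len(carre)-1):
--         if a[y]==a[y+1]:
--             None
--         else:
--             return False
--     return True
-- ===== SOURCE B (Python) =====
-- def verification_somme(carre):
--     def go(rows, target):
--         if not rows:
--             return True
--         if sum(rows[0]) != target: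
--             return False
--         return go(rows[1:], target)
--     if not carre:
--         return True
--     return go(carre[1:], sum(carre[0]))
-- ===== Notes on version B (the rewrite author's own statement) =====
-- stated objective: simpler
-- what changed: Instead of A's two staged passes (build the full list of row sums by index, then scan adjacent pairs), B fixes the first row's sum as a target and recursively checks the remaining rows against it in one pass with early exit and no intermediate list.
import Mathlib
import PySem

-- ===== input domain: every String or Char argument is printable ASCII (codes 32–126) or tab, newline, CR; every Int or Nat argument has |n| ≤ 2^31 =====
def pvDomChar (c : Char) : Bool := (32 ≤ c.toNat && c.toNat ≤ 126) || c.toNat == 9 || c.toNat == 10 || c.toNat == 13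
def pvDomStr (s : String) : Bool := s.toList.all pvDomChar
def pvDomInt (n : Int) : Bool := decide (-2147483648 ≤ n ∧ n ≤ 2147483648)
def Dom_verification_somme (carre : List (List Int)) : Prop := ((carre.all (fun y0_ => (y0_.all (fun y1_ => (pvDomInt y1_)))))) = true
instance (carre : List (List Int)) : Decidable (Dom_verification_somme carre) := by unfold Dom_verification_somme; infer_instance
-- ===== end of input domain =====

-- B replaces A's two staged passes (build the full list of row sums, then scan
-- adjacent pairs) with a single recursive pass comparing each remaining row's
-- sum to the first row's sum, with early exit and no intermediate list (simpler).

-- ===== PORT A =====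
def somme_ligne (carre : List (List Int)) (n : Int) : Int :=
  (PySem.List.pyGetD carre n []).foldl (fun somme i => somme + i) 0

def vsCheck (a : List Int) : List Int → Bool
  | [] => true
  | y :: ys =>
      if PySem.List.pyGetD a y 0 == PySem.List.pyGetD a (y + 1) 0 then vsCheck a ys
      else false

def verification_somme (carre : List (List Int)) : Bool :=
  let a := (PySem.List.pyRange 0 (PySem.List.len carre) 1).foldl
    (fun acc b => acc ++ [somme_ligne carre b]) []
  vsCheck a (PySem.List.pyRange 0 (PySem.List.len carre - 1) 1)

-- ===== PORT B =====
def vsGo : List (List Int) → Int → Bool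
  | [], _ => true
  | r :: rs, target => if r.sum ≠ target then false else vsGo rs target

def verification_somme_alt (carre : List (List Int)) : Bool :=
  match carre with
  | [] => true
  | r :: rs => vsGo rs r.sum

-- ===== PRECONDITION & SPEC =====
def Spec_verification_somme (carre : List (List Int)) (out : Bool) : Prop := out = verification_somme_alt carre
instance (carre : List (List Int)) (out : Bool) : Decidable (Spec_verification_somme carre out) := by unfold Spec_verification_somme; infer_instance

-- ===== CLAIM (what is proved, stated in full; the proofs are below) =====
def Claim_equal_verification_somme : Prop := ∀ (carre : List (List Int)), Dom_verification_somme carre → Spec_verification_somme carre (verification_somme carre)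

-- ===== LEMMAS AND PROOFS =====

/-- all elements of the list are equal to each other -/
def allEq (s : List Int) : Prop := ∀ x ∈ s, ∀ y ∈ s, x = y

/-- A's first loop builds exactly the list of row sums (as left folds). -/
lemma build_eq (carre : List (List Int)) :
    (PySem.List.pyRange 0 (PySem.List.len carre) 1).foldl
      (fun acc b => acc ++ [somme_ligne carre b]) []
      = carre.map (fun r => r.foldl (fun s i => s + i) 0) := by
  rw [PySem.List.foldl_append_singleton_eq_map, List.nil_append]
  have h : somme_ligne carre =
      (fun r : List Int => r.foldl (fun s i => s + i) 0) ∘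
        (fun b => PySem.List.pyGetD carre b []) := rfl
  rw [h, ← List.map_map, PySem.List.map_pyGetD_pyRange_zero]

/-- A's second loop over range(a,b) checks equality of adjacent entries. -/
lemma vsCheck_iff (s : List Int) (k : Nat) :
    ∀ (a b : Int), (b - a).toNat = k →
      (vsCheck s (PySem.List.pyRange a b 1) = true ↔
        ∀ j : Int, a ≤ j → j < b →
          PySem.List.pyGetD s j 0 = PySem.List.pyGetD s (j + 1) 0) := by
  induction k with
  | zero =>
      intro a b hk
      have hba : b ≤ a := by omega
      have : PySem.List.pyRange a b 1 = [] := by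
        rw [PySem.List.pyRange_one]
        have : (b - a).toNat = 0 := by omega
        simp [this]
      rw [this]
      simp [vsCheck]
      intro j hj hjb
      omega
  | succ k ih =>
      intro a b hk
      have hab : a < b := by omega
      rw [PySem.List.pyRange_one_cons hab]
      simp only [vsCheck]
      have hih := ih (a + 1) b (by omega)
      by_cases h : PySem.List.pyGetD s a 0 = PySem.List.pyGetD s (a + 1) 0
      · simp only [h, beq_self_eq_true, if_true]
        rw [hih]
        constructor
        · intro hall j hj hjb
          rcases eq_or_lt_of_le hj with rfl | hj'
          · exact h
          · exact hall j (by omega) hjb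
        · intro hall j hj hjb
          exact hall j (by omega) hjb
      · have : (PySem.List.pyGetD s a 0 == PySem.List.pyGetD s (a + 1) 0) = false := by
          simp [h]
        simp only [this, Bool.false_eq_true, if_false]
        constructor
        · intro hf; exact absurd hf (by simp)
        · intro hall
          exact absurd (hall a le_rfl hab) h

/-- adjacent equality of entries is the same as all entries being equal -/
lemma adj_iff_allEq (s : List Int) :
    (∀ j : Nat, j + 1 < s.length → s.getD j 0 = s.getD (j + 1) 0) ↔ allEq s := by
  constructor
  · intro hadj
    have hhead : ∀ i : Nat, i < s.length → s.getD i 0 = s.getD 0 0 := by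
      intro i
      induction i with
      | zero => intro _; rfl
      | succ n ihn =>
          intro hlt
          have := hadj n (by omega)
          rw [← this]
          exact ihn (by omega)
    intro x hx y hy
    obtain ⟨i, hi, hxi⟩ := List.getElem_of_mem hx
    obtain ⟨j, hj, hyj⟩ := List.getElem_of_mem hy
    have h1 : s.getD i 0 = x := by rw [List.getD_eq_getElem s 0 hi, hxi]
    have h2 : s.getD j 0 = y := by rw [List.getD_eq_getElem s 0 hj, hyj]
    rw [← h1, ← h2, hhead i hi, hhead j hj]
  · intro hall j hj
    have h1 : s.getD j 0 ∈ s := by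
      rw [List.getD_eq_getElem s 0 (by omega)]; exact List.getElem_mem _
    have h2 : s.getD (j + 1) 0 ∈ s := by
      rw [List.getD_eq_getElem s 0 hj]; exact List.getElem_mem _
    exact hall _ h1 _ h2

/-- A returns true iff all row sums are equal. -/
lemma portA_iff (carre : List (List Int)) :
    verification_somme carre = true ↔
      allEq (carre.map (fun r => r.foldl (fun s i => s + i) 0)) := by
  unfold verification_somme
  simp only [build_eq]
  set s := carre.map (fun r => r.foldl (fun s i => s + i) 0) with hs
  have hlen : PySem.List.len carre = (s.length : Int) := by
    simp [PySem.List.len, hs]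
  rw [hlen, vsCheck_iff s ((s.length : Int) - 1 - 0).toNat 0 ((s.length : Int) - 1) rfl]
  rw [← adj_iff_allEq]
  constructor
  · intro h j hj
    have := h (j : Int) (by omega) (by omega)
    rwa [PySem.List.pyGetD_natCast, show ((j : Int) + 1) = ((j + 1 : Nat) : Int) by push_cast; ring,
      PySem.List.pyGetD_natCast] at this
  · intro h j hj0 hjb
    obtain ⟨n, rfl⟩ := Int.eq_ofNat_of_zero_le hj0
    rw [PySem.List.pyGetD_natCast, show ((n : Int) + 1) = ((n + 1 : Nat) : Int) by push_cast; ring,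
      PySem.List.pyGetD_natCast]
    exact h n (by omega)

/-- B's recursive pass accepts iff every remaining row sums to the target. -/
lemma vsGo_iff (rs : List (List Int)) (t : Int) :
    vsGo rs t = true ↔ ∀ r ∈ rs, r.sum = t := by
  induction rs with
  | nil => simp [vsGo]
  | cons r rs ih =>
      simp only [vsGo]
      by_cases h : r.sum = t
      · simp [h, ih]
      · simp [h]

/-- B returns true iff all row sums are equal. -/
lemma portB_iff (carre : List (List Int)) :
    verification_somme_alt carre = true ↔
      allEq (carre.map (fun r => r.foldl (fun s i => s + i) 0)) := by
  have hfun : ∀ r : List Int, r.foldl (fun s i => s + i) 0 = r.sum := by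
    intro r; rw [List.sum_eq_foldl]
  cases carre with
  | nil =>
      simp only [verification_somme_alt, List.map_nil]
      constructor
      · intro _ x hx; exact absurd hx (by simp)
      · intro _; trivial
  | cons r rs =>
      simp only [verification_somme_alt, vsGo_iff, List.map_cons]
      constructor
      · intro hall x hx y hy
        have key : ∀ z ∈ (r :: rs).map (fun q : List Int => q.foldl (fun s i => s + i) 0),
            z = r.sum := by
          intro z hz
          simp only [List.map_cons, List.mem_cons] at hz
          rcases hz with rfl | hz
          · exact hfun r
          · obtain ⟨q, hq, rfl⟩ := List.mem_map.1 hz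
            rw [hfun q]; exact hall q hq
        rw [key x hx, key y hy]
      · intro hall q hq
        have h1 : q.foldl (fun s i => s + i) 0 ∈
            (r :: rs).map (fun q : List Int => q.foldl (fun s i => s + i) 0) := by
          simp only [List.map_cons, List.mem_cons]
          right; exact List.mem_map.2 ⟨q, hq, rfl⟩
        have h2 : r.foldl (fun s i => s + i) 0 ∈
            (r :: rs).map (fun q : List Int => q.foldl (fun s i => s + i) 0) := by
          simp
        have := hall _ h1 _ h2
        rwa [hfun q, hfun r] at this

-- ===== VERDICT (by name: the statement is the Claim_ definition above) =====
theorem verification_somme_spec : Claim_equal_verification_somme := by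
  intro carre _
  unfold Spec_verification_somme
  rw [Bool.eq_iff_iff, portA_iff, portB_iff]
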